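-- pv_equiv track=rewrite | github.com/agutkin/text-fabric | tf/core/helpers.py | rangesFromSet
-- ===== SOURCE A (Python) =====
-- def rangesFromSet(nodeSet):
--   ranges = []
--   curstart = None
--   curend = None
--   for n in sorted(nodeSet):
--     if curstart is None:
--       curstart = n
--       curend = n
--     elif n == curend + 1:
--       curend = n
--     else:
--       ranges.append((curstart, curend))
--       curstart = n
--       curend = n
--   if curstart is not None:
--     ranges.append((curstart, curend))
--   return ranges
-- ===== SOURCE B (Python) =====
-- from itertools import groupby
--
--
-- def rangesFromSet(nodeSet):
--   ranges = []
--   for _, grp in groupby(enumerate(sorted(nodeSet)), key=lambda p: p[1] - p[0]):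
--     grp = list(grp)
--     ranges.append((grp[0][1], grp[-1][1]))
--   return ranges
-- ===== Notes on version B (the rewrite author's own statement) =====
-- stated objective: idiomatic
-- what changed: Replaces the hand-rolled curstart/curend gap-detection accumulator with itertools.groupby over enumerate(sorted(nodeSet)) keyed on value-minus-index, which is constant on each maximal run of consecutive integers; each group's first and last values give the range endpoints.
import Mathlib
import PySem

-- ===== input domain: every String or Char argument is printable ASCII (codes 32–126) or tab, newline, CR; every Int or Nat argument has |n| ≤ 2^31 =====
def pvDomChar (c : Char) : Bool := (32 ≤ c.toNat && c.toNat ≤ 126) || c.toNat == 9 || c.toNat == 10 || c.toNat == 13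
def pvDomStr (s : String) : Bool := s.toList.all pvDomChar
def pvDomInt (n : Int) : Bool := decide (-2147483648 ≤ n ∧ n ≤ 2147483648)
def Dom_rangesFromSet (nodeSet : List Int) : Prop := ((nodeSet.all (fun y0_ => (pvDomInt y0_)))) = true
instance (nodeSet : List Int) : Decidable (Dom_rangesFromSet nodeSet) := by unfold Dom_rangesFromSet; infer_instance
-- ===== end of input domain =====

-- B replaces A's curstart/curend gap-detection accumulator with a group-by on the
-- value-minus-index key over the enumerated sorted list (idiomatic decomposition).


-- ===== PORT A =====
-- curstart/curend are always both None or both set, carried as Option (Int × Int)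
def rangesFromSet (nodeSet : List Int) : List (Int × Int) :=
  let st := (PySem.List.sorted nodeSet (fun x => x) false).foldl
    (fun (st : List (Int × Int) × Option (Int × Int)) n =>
      match st with
      | (ranges, none) => (ranges, some (n, n))
      | (ranges, some (cs, ce)) =>
        if n == ce + 1 then (ranges, some (cs, n))
        else (ranges ++ [(cs, ce)], some (n, n)))
    ([], none)
  match st with
  | (ranges, some (cs, ce)) => ranges ++ [(cs, ce)]
  | (ranges, none) => ranges

-- ===== PORT B =====
-- key=lambda p: p[1] - p[0]
def pvKey (p : Int × Int) : Int := p.2 - p.1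

-- itertools.groupby: consecutive elements with equal key form one group
def pvGroupBy : List (Int × Int) → List (List (Int × Int))
  | [] => []
  | x :: xs =>
    match pvGroupBy xs with
    | [] => [[x]]
    | [] :: gs => [x] :: [] :: gs
    | (y :: g) :: gs =>
      if pvKey x == pvKey y then (x :: y :: g) :: gs else [x] :: (y :: g) :: gs

def rangesFromSet_alt (nodeSet : List Int) : List (Int × Int) :=
  (pvGroupBy (PySem.List.enumerate (PySem.List.sorted nodeSet (fun x => x) false))).map
    (fun g => (g.headI.2, g.getLastI.2))

-- ===== PRECONDITION & SPEC =====
def Spec_rangesFromSet (nodeSet : List Int) (out : List (Int × Int)) : Prop := out = rangesFromSet_alt nodeSet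
instance (nodeSet : List Int) (out : List (Int × Int)) : Decidable (Spec_rangesFromSet nodeSet out) := by unfold Spec_rangesFromSet; infer_instance

-- ===== CLAIM (what is proved, stated in full; the proofs are below) =====
def Claim_equal_rangesFromSet : Prop := ∀ (nodeSet : List Int), Dom_rangesFromSet nodeSet → Spec_rangesFromSet nodeSet (rangesFromSet nodeSet)

-- ===== LEMMAS AND PROOFS =====

-- the left-to-right run-splitting recursion both sides compute
def chopA (cs ce : Int) : List Int → List (Int × Int)
  | [] => [(cs, ce)]
  | n :: xs => if n = ce + 1 then chopA cs n xs else (cs, ce) :: chopA n n xs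

def pvStep (st : List (Int × Int) × Option (Int × Int)) (n : Int) :
    List (Int × Int) × Option (Int × Int) :=
  match st with
  | (ranges, none) => (ranges, some (n, n))
  | (ranges, some (cs, ce)) =>
    if n == ce + 1 then (ranges, some (cs, n))
    else (ranges ++ [(cs, ce)], some (n, n))

def pvFin (st : List (Int × Int) × Option (Int × Int)) : List (Int × Int) :=
  match st with
  | (ranges, some (cs, ce)) => ranges ++ [(cs, ce)]
  | (ranges, none) => ranges

theorem foldA_chop (xs : List Int) : ∀ (ranges : List (Int × Int)) (cs ce : Int),
    pvFin (xs.foldl pvStep (ranges, some (cs, ce))) = ranges ++ chopA cs ce xs := by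
  induction xs with
  | nil => intro ranges cs ce; simp [pvFin, chopA]
  | cons n xs ih =>
    intro ranges cs ce
    by_cases h : n = ce + 1 <;>
      simp [pvStep, chopA, h, ih, List.append_assoc]

theorem getLastI_cons_cons (a b : Int × Int) (l : List (Int × Int)) :
    (a :: b :: l).getLastI = (b :: l).getLastI := by
  simp [List.getLastI_eq_getLast?_getD, List.getLast?_cons_cons]

theorem groupBy_cons (x : Int × Int) (l : List (Int × Int)) :
    ∃ g gs, pvGroupBy (x :: l) = (x :: g) :: gs := by
  rw [pvGroupBy]
  rcases pvGroupBy l with _ | ⟨_ | ⟨y, g⟩, gs⟩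
  · exact ⟨[], [], rfl⟩
  · exact ⟨[], [] :: gs, rfl⟩
  · by_cases h : pvKey x == pvKey y
    · exact ⟨y :: g, gs, by simp [h]⟩
    · exact ⟨[], (y :: g) :: gs, by simp [h]⟩

def mapEnds (gs : List (List (Int × Int))) : List (Int × Int) :=
  gs.map (fun g => (g.headI.2, g.getLastI.2))

theorem main_lemma (xs : List Int) : ∀ (i n cs : Int),
    ∃ b rest, mapEnds (pvGroupBy ((i, n) :: PySem.List.enumerate xs (i + 1))) = (n, b) :: rest ∧
      chopA cs n xs = (cs, b) :: rest := by
  induction xs with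
  | nil =>
    intro i n cs
    exact ⟨n, [], by simp [PySem.List.enumerate_nil, pvGroupBy, mapEnds, chopA, List.getLastI]⟩
  | cons m ys ih =>
    intro i n cs
    rw [PySem.List.enumerate_cons]
    obtain ⟨b, rest, h1, h2⟩ := ih (i + 1) m m
    by_cases h : m = n + 1
    · -- equal keys: (i, n) joins the head group
      obtain ⟨g, gs, hg⟩ := groupBy_cons (i + 1, m) (PySem.List.enumerate ys (i + 1 + 1))
      have hk : (pvKey (i, n) == pvKey (i + 1, m)) = true := by
        simp [pvKey]; omega
      refine ⟨b, rest, ?_, ?_⟩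
      · have : mapEnds (pvGroupBy ((i, n) :: (i + 1, m) :: PySem.List.enumerate ys (i + 1 + 1)))
            = (n, ((i + 1, m) :: g).getLastI.2) :: mapEnds gs := by
          rw [pvGroupBy, hg]
          simp [hk, mapEnds, getLastI_cons_cons]
        rw [this]
        have hb : ((i + 1, m) :: g).getLastI.2 = b ∧ mapEnds gs = rest := by
          rw [hg] at h1
          simpa [mapEnds] using h1
        rw [hb.1, hb.2]
      · rw [chopA, if_pos h]
        obtain ⟨b', rest', h1', h2'⟩ := ih (i + 1) m cs
        rw [h1] at h1'
        obtain ⟨hh, ht⟩ := List.cons_eq_cons.mp h1'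
        have hb : b = b' := congrArg Prod.snd hh
        rw [h2', ← hb, ← ht]
    · -- key break: (i, n) is its own group
      obtain ⟨g, gs, hg⟩ := groupBy_cons (i + 1, m) (PySem.List.enumerate ys (i + 1 + 1))
      have hk : (pvKey (i, n) == pvKey (i + 1, m)) = false := by
        simp [pvKey]; omega
      refine ⟨n, (m, b) :: rest, ?_, ?_⟩
      · have : mapEnds (pvGroupBy ((i, n) :: (i + 1, m) :: PySem.List.enumerate ys (i + 1 + 1)))
            = (n, n) :: mapEnds (((i + 1, m) :: g) :: gs) := by
          rw [pvGroupBy, hg]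
          simp [hk, mapEnds, List.getLastI]
        rw [this, ← hg, h1]
      · rw [chopA, if_neg h]
        obtain ⟨b', rest', h1', h2'⟩ := ih (i + 1) m m
        rw [h1] at h1'
        obtain ⟨hh, ht⟩ := List.cons_eq_cons.mp h1'
        have hb : b = b' := congrArg Prod.snd hh
        rw [h2', ← hb, ← ht]

-- ===== VERDICT (by name: the statement is the Claim_ definition above) =====
theorem rangesFromSet_spec : Claim_equal_rangesFromSet := by
  intro nodeSet _
  unfold Spec_rangesFromSet rangesFromSet rangesFromSet_alt
  rcases hs : PySem.List.sorted nodeSet (fun x => x) false with _ | ⟨n, xs⟩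
  · simp [pvGroupBy, PySem.List.enumerate_nil]
  · obtain ⟨b, rest, h1, h2⟩ := main_lemma xs 0 n n
    show pvFin ((n :: xs).foldl pvStep ([], none)) = mapEnds (pvGroupBy (PySem.List.enumerate (n :: xs) 0))
    rw [PySem.List.enumerate_cons]
    have : List.foldl pvStep ([], none) (n :: xs) = List.foldl pvStep ([], some (n, n)) xs := rfl
    rw [this, foldA_chop, List.nil_append, h2]
    simpa using h1.symm
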